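-- pv_equiv track=rewrite | github.com/t-yamana/atcoder_abc | Bit_Search/c249_JustK.py | k_len_count
-- ===== SOURCE A (Python) =====
-- def k_len_count(text: str, k: int) -> int:
--   hist = {}
--   for c in text:
--     hist.setdefault(c, 0)
--     hist[c] += 1
--   cnt = 0
--   for v in hist.values():
--     if v == k:
--       cnt += 1
--   return cnt
-- ===== SOURCE B (Python) =====
-- def k_len_count(text: str, k: int) -> int:
--   s = sorted(text)
--   cnt = 0
--   i = 0
--   n = len(s)
--   while i < n:
--     j = i
--     while j < n and s[j] == s[i]:
--       j += 1
--     if j - i == k: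
--       cnt += 1
--     i = j
--   return cnt
-- ===== Notes on version B (the rewrite author's own statement) =====
-- stated objective: alternative
-- what changed: Replaces the hash-histogram (dict of counts, then a scan of the values) by sort-then-scan: sort the characters and count maximal runs of equal characters whose length is exactly k.
import Mathlib
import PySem

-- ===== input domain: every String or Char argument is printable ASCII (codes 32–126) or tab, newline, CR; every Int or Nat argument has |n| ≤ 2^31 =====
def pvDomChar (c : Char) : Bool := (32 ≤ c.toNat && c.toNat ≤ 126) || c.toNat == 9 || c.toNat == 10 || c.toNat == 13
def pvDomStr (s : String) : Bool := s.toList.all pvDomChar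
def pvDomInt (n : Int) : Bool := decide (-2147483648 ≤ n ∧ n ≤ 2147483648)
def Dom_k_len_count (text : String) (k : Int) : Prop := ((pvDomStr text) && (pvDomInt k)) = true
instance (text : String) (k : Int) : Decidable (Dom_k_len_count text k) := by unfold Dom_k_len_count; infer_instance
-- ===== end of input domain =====

-- B replaces A's dict histogram by sort-then-scan over runs of equal characters; same results, alternative algorithm.


-- ===== PORT A =====
-- hist.setdefault(c, 0); hist[c] += 1   (read-then-store ported as getD/insert on the setdefault'd dict)
def k_len_count (text : String) (k : Int) : Int :=
  let hist : PySem.Dict Char Int :=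
    text.toList.foldl (fun d c =>
      let d1 := d.setdefault c 0
      d1.insert c (d1.getD c 0 + 1)) PySem.Dict.empty
  hist.values.foldl (fun cnt v => if v == k then cnt + 1 else cnt) 0

-- ===== PORT B =====
-- inner while over the run of s[i] ported as takeWhile/dropWhile; j - i == k is 1 + run length == k
def pvRunCount (s : List Char) (k : Int) : Int :=
  match s with
  | [] => 0
  | c :: t =>
    (if ((1 + (t.takeWhile (· == c)).length : Int) == k) then 1 else 0)
      + pvRunCount (t.dropWhile (· == c)) k
termination_by s.length
decreasing_by
  simp only [List.length_cons]
  exact Nat.lt_succ_of_le (List.length_dropWhile_le _ t)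

def k_len_count_alt (text : String) (k : Int) : Int :=
  pvRunCount (PySem.List.sorted text.toList (fun c => c) false) k

-- ===== PRECONDITION & SPEC =====
def Spec_k_len_count (text : String) (k : Int) (out : Int) : Prop := out = k_len_count_alt text k
instance (text : String) (k : Int) (out : Int) : Decidable (Spec_k_len_count text k out) := by unfold Spec_k_len_count; infer_instance

-- ===== CLAIM (what is proved, stated in full; the proofs are below) =====
def Claim_equal_k_len_count : Prop := ∀ (text : String) (k : Int), Dom_k_len_count text k → Spec_k_len_count text k (k_len_count text k)

-- ===== LEMMAS AND PROOFS =====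

-- the common value: number of distinct characters of cs whose multiplicity in cs is exactly k
def pvN (cs : List Char) (k : Int) : Int :=
  ((PySem.Set.ofList cs).countP (fun c => ((cs.count c : Int) == k)) : Int)

-- A's histogram step is the counter step
lemma pvStepEq :
    (fun (d : PySem.Dict Char Int) c =>
      let d1 := d.setdefault c 0
      d1.insert c (d1.getD c 0 + 1)) =
    (fun (d : PySem.Dict Char Int) c => d.insert c (d.getD c 0 + 1)) := by
  funext d c
  by_cases hc : d.contains c = true
  · simp [PySem.Dict.setdefault_of_contains d 0 hc]
  · rw [show (d.setdefault c 0) = d.insert c 0 from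
        PySem.Dict.setdefault_of_not_contains d 0 (by simpa using hc)]
    simp [PySem.Dict.getD_insert_self, PySem.Dict.insert_insert_self,
      PySem.Dict.getD_of_not_contains d 0 (by simpa using hc)]

lemma pvA_eq_N (text : String) (k : Int) : k_len_count text k = pvN text.toList k := by
  rw [k_len_count]
  rw [show (fun (d : PySem.Dict Char Int) c =>
      let d1 := d.setdefault c 0
      d1.insert c (d1.getD c 0 + 1)) =
    (fun (d : PySem.Dict Char Int) c => d.insert c (d.getD c 0 + 1)) from pvStepEq,
    PySem.Dict.foldl_insert_getD_add_one_eq_counter, PySem.List.foldl_beq_add_one]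
  show 0 + _ = _
  rw [zero_add, pvN]
  have hv : (PySem.Dict.counter text.toList).values
      = (PySem.Set.ofList text.toList).map (fun c => ((text.toList.count c : Int))) := by
    show (PySem.Dict.counter text.toList).items.map _ = _
    rw [PySem.Dict.items_counter, List.map_map]
    rfl
  rw [hv, List.count, List.countP_map]
  rfl


lemma pvRunCount_sorted (s : List Char) (k : Int) (h : s.Pairwise (· ≤ ·)) :
    pvRunCount s k = pvN s k := by
  induction s using pvRunCount.induct with
  | case1 => simp [pvRunCount, pvN, PySem.Set.ofList]
  | case2 c t ih =>
    have hpt : t.Pairwise (· ≤ ·) := h.of_cons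
    have hcle : ∀ x ∈ t, c ≤ x := (List.pairwise_cons.mp h).1
    have hp2 : (t.dropWhile (· == c)).Pairwise (· ≤ ·) :=
      hpt.sublist (List.dropWhile_sublist _)
    set t1 := t.takeWhile (· == c) with ht1
    set t2 := t.dropWhile (· == c) with ht2
    -- c is not in t2
    have hc2 : c ∉ t2 := by
      rw [ht2]
      intro hmem
      cases hdw : t.dropWhile (· == c) with
      | nil => rw [hdw] at hmem; exact absurd hmem (List.not_mem_nil)
      | cons d r =>
        rw [hdw] at hmem
        have hne : t.dropWhile (· == c) ≠ [] := by rw [hdw]; exact List.cons_ne_nil d r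
        have hhd := List.head_dropWhile_not (fun x => x == c) hne
        have hdc : (d == c) = false := by
          have : (t.dropWhile (· == c)).head hne = d := by
            simp only [hdw, List.head_cons]
          rwa [this] at hhd
        have hdc' : d ≠ c := by simpa using hdc
        have hlt : c < d := by
          have hdt : d ∈ t := (List.dropWhile_sublist _).mem (hdw ▸ List.mem_cons_self) 
          exact lt_of_le_of_ne (hcle d hdt) (Ne.symm hdc')
        have hp2' : (d :: r).Pairwise (· ≤ ·) := by
          rw [ht2, hdw] at hp2; exact hp2
        rcases List.mem_cons.mp hmem with h' | h'
        · exact hdc' h'.symm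
        · exact absurd hlt (not_lt.mpr ((List.pairwise_cons.mp hp2').1 c h'))
    have ht1c : ∀ x ∈ t1, x = c := fun x hx => by
      simpa using List.mem_takeWhile_imp hx
    have hcount1 : t1.count c = t1.length :=
      List.count_eq_length.mpr (fun b hb => (ht1c b hb).symm)
    have hsplit : t1 ++ t2 = t := List.takeWhile_append_dropWhile
    have hcnt : (c :: t).count c = 1 + t1.length := by
      rw [List.count_cons_self, ← hsplit, List.count_append, hcount1,
        List.count_eq_zero.mpr hc2]
      omega
    have hcntd : ∀ d, d ≠ c → (c :: t).count d = t2.count d := by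
      intro d hd
      rw [List.count_cons, ← hsplit, List.count_append,
        List.count_eq_zero.mpr (fun hm => hd (ht1c d hm))]
      simp [Ne.symm hd]
    have hperm : (PySem.Set.ofList (c :: t)).Perm (c :: PySem.Set.ofList t2) := by
      rw [List.perm_ext_iff_of_nodup (PySem.Set.nodup_ofList _)
        (List.nodup_cons.mpr ⟨fun hm => hc2 ((PySem.Set.mem_ofList _ _).mp hm),
          PySem.Set.nodup_ofList _⟩)]
      intro x
      simp only [PySem.Set.mem_ofList, List.mem_cons]
      constructor
      · rintro (rfl | hx)
        · exact Or.inl rfl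
        · rw [← hsplit] at hx
          rcases List.mem_append.mp hx with hx | hx
          · exact Or.inl (ht1c x hx)
          · exact Or.inr hx
      · rintro (rfl | hx)
        · exact Or.inl rfl
        · exact Or.inr ((List.dropWhile_sublist _).mem hx)
    rw [pvRunCount, pvN, hperm.countP_eq, List.countP_cons]
    have hpc : (((c :: t).count c : Int) == k) = ((1 + t1.length : Int) == k) := by
      rw [hcnt]; push_cast; ring_nf
    have hrest : (PySem.Set.ofList t2).countP (fun d => (((c :: t).count d : Int) == k))
        = (PySem.Set.ofList t2).countP (fun d => ((t2.count d : Int) == k)) := by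
      apply List.countP_congr
      intro x hx
      have hxc : x ≠ c := fun hxc => hc2 (hxc ▸ (PySem.Set.mem_ofList _ _).mp hx)
      rw [hcntd x hxc]
    rw [hrest, ih hp2, pvN, hpc]
    push_cast
    ring


lemma pvN_perm (cs ds : List Char) (k : Int) (h : cs.Perm ds) : pvN cs k = pvN ds k := by
  unfold pvN
  have hsp : (PySem.Set.ofList cs).Perm (PySem.Set.ofList ds) :=
    (List.perm_ext_iff_of_nodup (PySem.Set.nodup_ofList _) (PySem.Set.nodup_ofList _)).mpr
      (fun a => by rw [PySem.Set.mem_ofList, PySem.Set.mem_ofList, h.mem_iff])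
  rw [List.countP_congr (fun x _ => by rw [h.count_eq]), hsp.countP_eq]


-- ===== VERDICT (by name: the statement is the Claim_ definition above) =====
theorem k_len_count_spec : Claim_equal_k_len_count := by
  intro text k _
  show k_len_count text k = k_len_count_alt text k
  rw [pvA_eq_N, k_len_count_alt,
    pvRunCount_sorted _ _ (PySem.List.sorted_pairwise _ _),
    pvN_perm _ _ _ (PySem.List.sorted_perm _ _ _)]
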